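-- pv_equiv track=rewrite | github.com/irena-flextool/flextool | flextool/process_inputs/read_self_describing_excel.py | _parse_default_value
-- ===== SOURCE A (Python) =====
-- ROW_KEYWORDS = frozenset({
--     "description",
--     "data type",
--     "parameter",
--     "alternative",
--     "entity",
--     "index",
--     "filter",
-- })
--
-- def _parse_default_value(text: str) -> tuple[str, str | None]:
--     """Parse a definition that may have a default value.
--
--     "parameter: profile" → ("parameter", "profile")
--     "parameter"          → ("parameter", None)
--     "data type: float"   → ("data type", "float")
--
--     Also handles the triplet format with ``|`` separator:
--     "parameter: profile | data type: float | description: ..."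
--     → ("parameter", "profile")
--     """
--     # Handle | separator: only parse the first segment
--     if "|" in text:
--         text = text.split("|")[0].strip()
--
--     for keyword in sorted(ROW_KEYWORDS, key=len, reverse=True):
--         if text.lower().startswith(keyword):
--             rest = text[len(keyword):].strip()
--             if rest.startswith(":"):
--                 return keyword, rest[1:].strip()
--             elif rest == "":
--                 return keyword, None
--     return text, None
-- ===== SOURCE B (Python) =====
-- ROW_KEYWORDS = frozenset({
--     "description",
--     "data type",
--     "parameter",
--     "alternative",
--     "entity",
--     "index",
--     "filter",
-- })
--
-- def _parse_default_value(text):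
--     """Single split at the first colon + one set lookup, instead of A's
--     prefix-scan loop over the keyword set."""
--     if "|" in text:
--         text = text.split("|")[0].strip()
--     i = text.find(":")
--     if i < 0:
--         key, value = text.rstrip().lower(), None
--     else:
--         key, value = text[:i].rstrip().lower(), text[i + 1:].strip()
--     if key in ROW_KEYWORDS:
--         return key, value
--     return text, None
-- ===== Notes on version B (the rewrite author's own statement) =====
-- stated objective: idiomatic
-- what changed: A scans the sorted keyword list and for each keyword tests a lowercase-prefix match plus a strip-based rest check; B splits the text once at the first colon, rstrips+lowercases the part before it, and does a single set-membership lookup.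
import Mathlib
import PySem

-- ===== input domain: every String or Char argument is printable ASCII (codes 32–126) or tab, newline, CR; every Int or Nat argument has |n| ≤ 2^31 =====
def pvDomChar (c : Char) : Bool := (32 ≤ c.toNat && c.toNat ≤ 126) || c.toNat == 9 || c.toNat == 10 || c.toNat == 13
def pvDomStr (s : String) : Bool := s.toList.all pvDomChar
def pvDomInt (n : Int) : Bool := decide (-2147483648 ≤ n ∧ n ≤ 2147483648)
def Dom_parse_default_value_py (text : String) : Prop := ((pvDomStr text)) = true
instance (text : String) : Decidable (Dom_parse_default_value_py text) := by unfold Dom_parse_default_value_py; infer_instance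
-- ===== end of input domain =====

-- B replaces A's prefix-scan loop over the keyword set by a single split at the
-- first colon plus one set-membership lookup (objective: idiomatic/simpler).

-- ===== PORT A =====
-- `text = text.split("|")[0].strip()` when "|" in text — this line is verbatim
-- identical in A and in B, so both ports share this helper.
def pvTruncBar (t : List Char) : List Char :=
  if PySem.Chars.isIn ['|'] t then
    PySem.Chars.strip (PySem.List.pyGetD (PySem.Chars.splitOn t ['|']) 0 [])
  else t

-- frozenset ROW_KEYWORDS in the order CPython's `sorted(ROW_KEYWORDS, key=len, reverse=True)` yields
def pvKeywordsSorted : List (List Char) :=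
  ["description".toList, "alternative".toList, "parameter".toList, "data type".toList,
   "filter".toList, "entity".toList, "index".toList]

-- one iteration of A's for-loop (`return …` = some, fall through = none)
def pvTryKeyword (t : List Char) (k : List Char) : Option (String × Option String) :=
  if PySem.Chars.startswith (PySem.Chars.lower t) k then
    let rest := PySem.Chars.strip (PySem.Chars.slice t (some (k.length : Int)) none)
    if PySem.Chars.startswith rest [':'] then
      some (String.ofList k, some (String.ofList (PySem.Chars.strip (PySem.Chars.slice rest (some 1) none))))
    else if rest = [] then some (String.ofList k, none)
    else none
  else none

def parse_default_value_py (text : String) : String × Option String :=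
  let t := pvTruncBar text.toList
  match pvKeywordsSorted.findSome? (pvTryKeyword t) with
  | some r => r
  | none => (String.ofList t, none)

-- ===== PORT B =====
def pvRowKeywords : List String :=
  ["description", "data type", "parameter", "alternative", "entity", "index", "filter"]

def parse_default_value_py_alt (text : String) : String × Option String :=
  let t := pvTruncBar text.toList
  let i := PySem.Chars.find t [':']
  let kv : List Char × Option (List Char) :=
    if i < 0 then (PySem.Chars.lower (PySem.Chars.rstrip t), none)
    else (PySem.Chars.lower (PySem.Chars.rstrip (PySem.Chars.slice t none (some i))),
          some (PySem.Chars.strip (PySem.Chars.slice t (some (i + 1)) none)))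
  if String.ofList kv.1 ∈ pvRowKeywords then (String.ofList kv.1, kv.2.map String.ofList)
  else (String.ofList t, none)

-- ===== PRECONDITION & SPEC =====
def Spec_parse_default_value_py (text : String) (out : String × Option String) : Prop := out = parse_default_value_py_alt text
instance (text : String) (out : String × Option String) : Decidable (Spec_parse_default_value_py text out) := by unfold Spec_parse_default_value_py; infer_instance

-- ===== CLAIM (what is proved, stated in full; the proofs are below) =====
def Claim_equal_parse_default_value_py : Prop := ∀ (text : String), Dom_parse_default_value_py text → Spec_parse_default_value_py text (parse_default_value_py text)

-- ===== LEMMAS AND PROOFS =====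

def pv_rstrip_def (s : List Char) : PySem.Chars.rstrip s = List.rdropWhile PySem.Chars.isspace s := rfl

lemma pv_lower_space {c : Char} (h : PySem.Chars.isspace c = true) : PySem.Chars.lowerChar c = c := by
  have hu : PySem.Chars.isupper c = false := by
    have hA : 'A'.val.toNat = 65 := rfl
    have hZ : 'Z'.val.toNat = 90 := rfl
    simp only [PySem.Chars.isupper, PySem.Chars.isspace, Char.le_def,
      UInt32.le_iff_toNat_le, Char.toNat, hA, hZ] at *
    revert h
    simp only [Bool.and_eq_true, Bool.or_eq_true, decide_eq_true_eq]
    intro h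
    simp only [Bool.and_eq_false_iff, decide_eq_false_iff_not, not_le]
    omega
  simp [PySem.Chars.lowerChar, hu]

lemma pv_singleton_infix {a : Char} {l : List Char} : [a] <:+: l ↔ a ∈ l := by
  constructor
  · intro h; exact h.subset (by simp)
  · intro h; obtain ⟨s, t2, rfl⟩ := List.append_of_mem h
    exact ⟨s, t2, by simp⟩

lemma pv_singleton_prefix {a : Char} {l : List Char} : [a] <+: l ↔ ∃ b, l = a :: b := by
  constructor
  · rintro ⟨b, rfl⟩; exact ⟨b, rfl⟩
  · rintro ⟨b, rfl⟩; exact ⟨b, rfl⟩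

lemma pv_rstrip_append {l w : List Char} (h : ∀ c ∈ w, PySem.Chars.isspace c = true) :
    PySem.Chars.rstrip (l ++ w) = PySem.Chars.rstrip l := by
  have hw : List.dropWhile PySem.Chars.isspace w.reverse = [] :=
    List.dropWhile_eq_nil_iff.mpr (by intro x hx; exact h x (List.mem_reverse.mp hx))
  simp [pv_rstrip_def, List.rdropWhile, List.reverse_append, List.dropWhile_append, hw]

lemma pv_rstrip_cons {x : Char} {xs : List Char} (h : PySem.Chars.isspace x = false) :
    PySem.Chars.rstrip (x :: xs) = x :: PySem.Chars.rstrip xs := by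
  simp only [pv_rstrip_def, List.rdropWhile, List.reverse_cons, List.dropWhile_append]
  split
  · next he =>
    simp only [List.isEmpty_iff] at he
    simp [List.dropWhile, h, he]
  · next he => simp [List.reverse_append]

lemma pv_strip_eq_nil_iff {l : List Char} :
    PySem.Chars.strip l = [] ↔ ∀ c ∈ l, PySem.Chars.isspace c = true := by
  constructor
  · intro h c hc
    rw [PySem.Chars.strip, pv_rstrip_def, List.rdropWhile_eq_nil_iff] at h
    rw [← List.takeWhile_append_dropWhile (p := PySem.Chars.isspace) (l := l)] at hc
    rcases List.mem_append.mp hc with h' | h'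
    · exact List.mem_takeWhile_imp h'
    · exact h c h'
  · intro h
    have : PySem.Chars.lstrip l = [] :=
      List.dropWhile_eq_nil_iff.mpr h
    simp [PySem.Chars.strip, this, pv_rstrip_def]

lemma pv_strip_rstrip (b : List Char) :
    PySem.Chars.strip (PySem.Chars.rstrip b) = PySem.Chars.strip b := by
  have hdecomp : PySem.Chars.rstrip b ++ List.rtakeWhile PySem.Chars.isspace b = b :=
    List.rdropWhile_append_rtakeWhile
  have hw : ∀ c ∈ List.rtakeWhile PySem.Chars.isspace b, PySem.Chars.isspace c = true :=
    fun c hc => List.mem_rtakeWhile_imp hc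
  by_cases he : PySem.Chars.lstrip (PySem.Chars.rstrip b) = []
  · have hall : ∀ c ∈ PySem.Chars.rstrip b, PySem.Chars.isspace c = true :=
      List.dropWhile_eq_nil_iff.mp he
    have hallb : ∀ c ∈ b, PySem.Chars.isspace c = true := by
      intro c hc
      rw [← hdecomp] at hc
      rcases List.mem_append.mp hc with h' | h'
      · exact hall c h'
      · exact hw c h'
    rw [pv_strip_eq_nil_iff.mpr hall, pv_strip_eq_nil_iff.mpr hallb]
  · conv_rhs => rw [← hdecomp]
    show PySem.Chars.rstrip (PySem.Chars.lstrip _) = PySem.Chars.rstrip (PySem.Chars.lstrip _)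
    have : PySem.Chars.lstrip (PySem.Chars.rstrip b ++ List.rtakeWhile PySem.Chars.isspace b)
        = PySem.Chars.lstrip (PySem.Chars.rstrip b) ++ List.rtakeWhile PySem.Chars.isspace b := by
      simp only [PySem.Chars.lstrip] at he ⊢
      rw [List.dropWhile_append, if_neg (by simpa [List.isEmpty_iff] using he)]
    rw [this, pv_rstrip_append hw]

lemma pv_rstrip_of_lower {a k : List Char} (hl : PySem.Chars.lower a = k)
    (hr : PySem.Chars.rstrip k = k) : PySem.Chars.rstrip a = a := by
  have hdecomp : PySem.Chars.rstrip a ++ List.rtakeWhile PySem.Chars.isspace a = a :=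
    List.rdropWhile_append_rtakeWhile
  have hw : ∀ c ∈ List.rtakeWhile PySem.Chars.isspace a, PySem.Chars.isspace c = true :=
    fun c hc => List.mem_rtakeWhile_imp hc
  have hk : k = PySem.Chars.lower (PySem.Chars.rstrip a)
      ++ PySem.Chars.lower (List.rtakeWhile PySem.Chars.isspace a) := by
    rw [← hl]
    conv_lhs => rw [← hdecomp]
    simp [PySem.Chars.lower]
  have hlw : ∀ c ∈ PySem.Chars.lower (List.rtakeWhile PySem.Chars.isspace a),
      PySem.Chars.isspace c = true := by
    intro c hc
    obtain ⟨d, hd, rfl⟩ := List.mem_map.mp hc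
    rw [pv_lower_space (hw d hd)]; exact hw d hd
  have hlen : (PySem.Chars.rstrip (PySem.Chars.lower (PySem.Chars.rstrip a))).length
      ≤ (PySem.Chars.rstrip a).length := by
    have := (List.rdropWhile_prefix PySem.Chars.isspace
      (PySem.Chars.lower (PySem.Chars.rstrip a))).length_le
    simpa [PySem.Chars.lower] using this
  have hkr : k = PySem.Chars.rstrip (PySem.Chars.lower (PySem.Chars.rstrip a)) := by
    conv_lhs => rw [← hr, hk]
    rw [pv_rstrip_append hlw]
  have hklen : k.length = (PySem.Chars.rstrip a).length
      + (List.rtakeWhile PySem.Chars.isspace a).length := by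
    rw [hk]; simp [PySem.Chars.lower]
  have : (List.rtakeWhile PySem.Chars.isspace a).length = 0 := by
    have := congrArg List.length hkr
    omega
  have hnil : List.rtakeWhile PySem.Chars.isspace a = [] := List.eq_nil_of_length_eq_zero this
  rw [hnil, List.append_nil] at hdecomp
  exact hdecomp

lemma pv_dropWhile_head {p : Char → Bool} {l : List Char} {x : Char} {xs : List Char}
    (h : l.dropWhile p = x :: xs) : p x = false := by
  induction l with
  | nil => simp at h
  | cons c t ih =>
    rw [List.dropWhile_cons] at h
    split at h
    · exact ih h
    · next hc => cases h; simpa using hc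

lemma pv_split_at {t : List Char} {n : Nat} {b : List Char}
    (hmin : ∀ j, j < n → ¬ ([':'] <+: t.drop j)) (hp : t.drop n = ':' :: b) :
    t.takeWhile (· ≠ ':') = t.take n ∧ t.dropWhile (· ≠ ':') = ':' :: b := by
  induction t generalizing n b with
  | nil => simp at hp
  | cons c t ih =>
    cases n with
    | zero =>
      simp only [List.drop_zero] at hp
      cases hp
      simp
    | succ m =>
      have hc : c ≠ ':' := by
        intro rfl'
        exact hmin 0 (Nat.succ_pos m) (by subst rfl'; exact ⟨t, rfl⟩)
      have hmin' : ∀ j, j < m → ¬ ([':'] <+: t.drop j) := by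
        intro j hj
        have := hmin (j + 1) (by omega)
        simpa using this
      have hp' : t.drop m = ':' :: b := by simpa using hp
      obtain ⟨h1, h2⟩ := ih hmin' hp'
      constructor
      · rw [List.takeWhile_cons_of_pos (by simpa using hc), h1]
        simp
      · rw [List.dropWhile_cons_of_pos (by simpa using hc), h2]

def pvHead (t : List Char) : List Char := t.takeWhile (· ≠ ':')
def pvTail (t : List Char) : List Char := t.dropWhile (· ≠ ':')
def pvKey (t : List Char) : List Char := PySem.Chars.lower (PySem.Chars.rstrip (pvHead t))

-- head/tail of t around the first colon, as lower/rstrip facts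
lemma pv_key_of_decomp {t a wx r : List Char} {k : List Char}
    (ht : t = a ++ (wx ++ (':' :: r)))
    (hca : (':' : Char) ∉ a) (hwx : ∀ c ∈ wx, PySem.Chars.isspace c = true)
    (hra : PySem.Chars.rstrip a = a) (hla : PySem.Chars.lower a = k) :
    pvKey t = k := by
  have hwxne : ∀ c ∈ wx, c ≠ ':' := by
    intro c hc h
    subst h
    have := hwx _ hc
    simp [PySem.Chars.isspace] at this
  have hhead : pvHead t = a ++ wx := by
    unfold pvHead
    rw [ht, List.takeWhile_append, if_pos, List.takeWhile_append, if_pos]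
    · rw [List.takeWhile_cons_of_neg (by simp)]
      simp
    · rw [List.takeWhile_eq_self_iff.mpr (by intro x hx; simpa using hwxne x hx)]
    · rw [List.takeWhile_eq_self_iff.mpr
        (by intro x hx; simp; rintro rfl; exact hca hx)]
  unfold pvKey
  rw [hhead, pv_rstrip_append hwx, hra, hla]

lemma pv_key_of_decomp_nocolon {t a w : List Char} {k : List Char}
    (ht : t = a ++ w)
    (hca : (':' : Char) ∉ a) (hw : ∀ c ∈ w, PySem.Chars.isspace c = true)
    (hra : PySem.Chars.rstrip a = a) (hla : PySem.Chars.lower a = k) :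
    pvKey t = k ∧ pvTail t = [] := by
  have hnc : ∀ x ∈ t, x ≠ ':' := by
    intro x hx h
    subst h
    rw [ht] at hx
    rcases List.mem_append.mp hx with h' | h'
    · exact hca h'
    · have := hw _ h'
      simp [PySem.Chars.isspace] at this
  have hhead : pvHead t = t := by
    unfold pvHead
    exact List.takeWhile_eq_self_iff.mpr (by intro x hx; simpa using hnc x hx)
  have htail : pvTail t = [] := by
    unfold pvTail
    exact List.dropWhile_eq_nil_iff.mpr (by intro x hx; simpa using hnc x hx)
  refine ⟨?_, htail⟩
  unfold pvKey
  rw [hhead, ht, pv_rstrip_append hw, hra, hla]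

lemma pv_decomp_of_key {t k : List Char} (hkey : pvKey t = k) :
    PySem.Chars.rstrip (pvHead t) ++
      (List.rtakeWhile PySem.Chars.isspace (pvHead t) ++ pvTail t) = t ∧
    t.take k.length = PySem.Chars.rstrip (pvHead t) ∧
    t.drop k.length = List.rtakeWhile PySem.Chars.isspace (pvHead t) ++ pvTail t := by
  have hAW : PySem.Chars.rstrip (pvHead t) ++ List.rtakeWhile PySem.Chars.isspace (pvHead t)
      = pvHead t := List.rdropWhile_append_rtakeWhile
  have hHT : pvHead t ++ pvTail t = t := List.takeWhile_append_dropWhile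
  have hlow : PySem.Chars.lower (PySem.Chars.rstrip (pvHead t)) = k := hkey
  have hlenA : (PySem.Chars.rstrip (pvHead t)).length = k.length := by
    rw [← hlow]; simp [PySem.Chars.lower]
  have ht : PySem.Chars.rstrip (pvHead t) ++
      (List.rtakeWhile PySem.Chars.isspace (pvHead t) ++ pvTail t) = t := by
    rw [← List.append_assoc, hAW, hHT]
  refine ⟨ht, ?_, ?_⟩
  · conv_lhs => rw [← ht, ← hlenA]
    rw [List.take_left]
  · conv_lhs => rw [← ht, ← hlenA]
    rw [List.drop_left]

lemma pv_startswith_of_key {t k : List Char} (hkey : pvKey t = k) :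
    PySem.Chars.startswith (PySem.Chars.lower t) k = true := by
  obtain ⟨ht, -, -⟩ := pv_decomp_of_key hkey
  rw [PySem.Chars.startswith, List.isPrefixOf_iff_prefix, ← ht]
  have : PySem.Chars.lower (PySem.Chars.rstrip (pvHead t)) = k := hkey
  simp only [PySem.Chars.lower, List.map_append] at this ⊢
  rw [this]
  exact List.prefix_append _ _

def pvVal (t : List Char) : Option (List Char) :=
  match pvTail t with
  | [] => none
  | _ :: b => some (PySem.Chars.strip b)

def pvKwProp (k : List Char) : Prop :=
  k ≠ [] ∧ PySem.Chars.lower k = k ∧ PySem.Chars.rstrip k = k ∧ (':' : Char) ∉ k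


lemma pvTryKeyword_eq (t k : List Char) (hk : pvKwProp k) :
    pvTryKeyword t k =
      if pvKey t = k then some (String.ofList k, (pvVal t).map String.ofList) else none := by
  obtain ⟨hne, hlow, hrs, hcol⟩ := hk
  by_cases hpre : PySem.Chars.startswith (PySem.Chars.lower t) k = true
  case neg =>
    rw [pvTryKeyword, if_neg hpre, if_neg]
    intro hkey
    exact hpre (pv_startswith_of_key hkey)
  case pos =>
    -- facts provided by the prefix test
    have hprefix : k <+: PySem.Chars.lower t := by
      rwa [PySem.Chars.startswith, List.isPrefixOf_iff_prefix] at hpre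
    have htake : PySem.Chars.lower (t.take k.length) = k := by
      obtain ⟨r, hr⟩ := hprefix
      have : (PySem.Chars.lower t).take k.length = k := by rw [← hr, List.take_left]
      simpa [PySem.Chars.lower, List.map_take] using this
    have hlentk : k.length ≤ t.length := by
      have := congrArg List.length htake
      simp only [PySem.Chars.lower, List.length_map, List.length_take] at this
      omega
    have hcolon_take : (':' : Char) ∉ t.take k.length := by
      intro hmem
      apply hcol
      rw [← htake]
      exact List.mem_map.mpr ⟨':', hmem, by decide⟩
    have hrtake : PySem.Chars.rstrip (t.take k.length) = t.take k.length :=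
      pv_rstrip_of_lower htake hrs
    have hslice : PySem.Chars.slice t (some (k.length : Int)) none = t.drop k.length := by
      rw [PySem.Chars.slice_eq_listSlice, PySem.List.slice_from_natCast]
    rw [pvTryKeyword, if_pos hpre]
    simp only [hslice]
    by_cases hkey : pvKey t = k
    case pos =>
      obtain ⟨ht, htk, hdr⟩ := pv_decomp_of_key hkey
      have hw : ∀ c ∈ List.rtakeWhile PySem.Chars.isspace (pvHead t),
          PySem.Chars.isspace c = true := fun c hc => List.mem_rtakeWhile_imp hc
      rw [if_pos hkey]
      rcases hpt : pvTail t with _ | ⟨x, b⟩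
      · -- no colon: rest = ""
        have hrest : PySem.Chars.strip (t.drop k.length) = [] := by
          rw [hdr, hpt, List.append_nil]
          exact pv_strip_eq_nil_iff.mpr hw
        rw [hrest]
        rw [if_neg (by decide), if_pos rfl]
        simp [pvVal, hpt]
      · -- first colon present
        have hx : x = ':' := by
          have := pv_dropWhile_head hpt
          simpa using this
        subst hx
        have hrest : PySem.Chars.strip (t.drop k.length) = ':' :: PySem.Chars.rstrip b := by
          rw [hdr, hpt]
          show PySem.Chars.rstrip (PySem.Chars.lstrip _) = _
          have h1 : PySem.Chars.lstrip
              (List.rtakeWhile PySem.Chars.isspace (pvHead t) ++ ':' :: b) = ':' :: b := by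
            simp only [PySem.Chars.lstrip, List.dropWhile_append]
            rw [if_pos (by rw [List.isEmpty_iff]; exact List.dropWhile_eq_nil_iff.mpr hw)]
            exact List.dropWhile_cons_of_neg (by decide)
          rw [h1, pv_rstrip_cons (by decide)]
        rw [hrest, if_pos (by simp [PySem.Chars.startswith, List.isPrefixOf])]
        have hsl1 : PySem.Chars.slice (':' :: PySem.Chars.rstrip b) (some 1) none
            = PySem.Chars.rstrip b := by
          rw [PySem.Chars.slice_eq_listSlice, PySem.List.slice_from_one]
          rfl
        rw [hsl1, pv_strip_rstrip]
        simp [pvVal, hpt]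
    case neg =>
      rw [if_neg hkey]
      have ht : t = t.take k.length ++ t.drop k.length := (List.take_append_drop _ _).symm
      -- branch 1: rest starts with ':' would force pvKey t = k
      by_cases h1 : PySem.Chars.startswith
          (PySem.Chars.strip (t.drop k.length)) [':'] = true
      · exfalso
        apply hkey
        rw [PySem.Chars.startswith, List.isPrefixOf_iff_prefix] at h1
        obtain ⟨r, hr⟩ := pv_singleton_prefix.mp h1
        -- strip d = ':' :: r  ⇒  d = wx ++ ':' :: (r ++ w2)
        have hd2 : PySem.Chars.rstrip (PySem.Chars.lstrip (t.drop k.length)) = ':' :: r := hr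
        obtain ⟨w2, hw2all, hLdecomp⟩ :
            ∃ w2, (∀ c ∈ w2, PySem.Chars.isspace c = true) ∧
              PySem.Chars.lstrip (t.drop k.length) = ':' :: (r ++ w2) := by
          refine ⟨List.rtakeWhile PySem.Chars.isspace (PySem.Chars.lstrip (t.drop k.length)),
            fun c hc => List.mem_rtakeWhile_imp hc, ?_⟩
          conv_lhs => rw [← List.rdropWhile_append_rtakeWhile
            (p := PySem.Chars.isspace) (l := PySem.Chars.lstrip (t.drop k.length))]
          rw [show List.rdropWhile PySem.Chars.isspace (PySem.Chars.lstrip (t.drop k.length))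
            = PySem.Chars.rstrip (PySem.Chars.lstrip (t.drop k.length)) from rfl, hd2]
          simp
        have hdd : t.drop k.length =
            List.takeWhile PySem.Chars.isspace (t.drop k.length) ++ (':' :: (r ++ w2)) := by
          conv_lhs => rw [← List.takeWhile_append_dropWhile
            (p := PySem.Chars.isspace) (l := t.drop k.length)]
          rw [show List.dropWhile PySem.Chars.isspace (t.drop k.length)
            = PySem.Chars.lstrip (t.drop k.length) from rfl, hLdecomp]
        apply pv_key_of_decomp (a := t.take k.length)
          (wx := List.takeWhile PySem.Chars.isspace (t.drop k.length))
          (r := r ++ w2)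
        · conv_lhs => rw [ht]
          rw [← hdd]
        · exact hcolon_take
        · exact fun c hc => List.mem_takeWhile_imp hc
        · exact hrtake
        · exact htake

      · rw [if_neg h1]
        by_cases h2 : PySem.Chars.strip (t.drop k.length) = []
        · exfalso
          apply hkey
          have hall : ∀ c ∈ t.drop k.length, PySem.Chars.isspace c = true :=
            pv_strip_eq_nil_iff.mp h2
          exact (pv_key_of_decomp_nocolon ht hcolon_take hall hrtake htake).1
        · rw [if_neg h2]


def pvCanon (t : List Char) : String × Option String :=
  if String.ofList (pvKey t) ∈ pvRowKeywords then (String.ofList (pvKey t), (pvVal t).map String.ofList)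
  else (String.ofList t, none)


lemma pv_ofList_eq {l : List Char} {s : String} (h : String.ofList l = s) : l = s.toList := by
  rw [← h, String.toList_ofList]

lemma pvA_core (t : List Char) :
    (match pvKeywordsSorted.findSome? (pvTryKeyword t) with
     | some r => r
     | none => (String.ofList t, none)) = pvCanon t := by
  have e1 := pvTryKeyword_eq t "description".toList (by unfold pvKwProp; decide)
  have e2 := pvTryKeyword_eq t "alternative".toList (by unfold pvKwProp; decide)
  have e3 := pvTryKeyword_eq t "parameter".toList (by unfold pvKwProp; decide)
  have e4 := pvTryKeyword_eq t "data type".toList (by unfold pvKwProp; decide)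
  have e5 := pvTryKeyword_eq t "filter".toList (by unfold pvKwProp; decide)
  have e6 := pvTryKeyword_eq t "entity".toList (by unfold pvKwProp; decide)
  have e7 := pvTryKeyword_eq t "index".toList (by unfold pvKwProp; decide)
  simp only [pvKeywordsSorted, List.findSome?_cons, e1, e2, e3, e4, e5, e6, e7,
    List.findSome?_nil]
  by_cases h1 : pvKey t = "description".toList
  · simp [h1, pvCanon, pvRowKeywords]
  by_cases h2 : pvKey t = "alternative".toList
  · simp [h2, pvCanon, pvRowKeywords]
  by_cases h3 : pvKey t = "parameter".toList
  · simp [h3, pvCanon, pvRowKeywords]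
  by_cases h4 : pvKey t = "data type".toList
  · simp [h4, pvCanon, pvRowKeywords]
  by_cases h5 : pvKey t = "filter".toList
  · simp [h5, pvCanon, pvRowKeywords]
  by_cases h6 : pvKey t = "entity".toList
  · simp [h6, pvCanon, pvRowKeywords]
  by_cases h7 : pvKey t = "index".toList
  · simp [h7, pvCanon, pvRowKeywords]
  have hmem : String.ofList (pvKey t) ∉ pvRowKeywords := by
    intro hmem
    simp only [pvRowKeywords, List.mem_cons, List.not_mem_nil, or_false] at hmem
    rcases hmem with h | h | h | h | h | h | h <;>
      first
        | exact h1 (pv_ofList_eq h)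
        | exact h2 (pv_ofList_eq h)
        | exact h3 (pv_ofList_eq h)
        | exact h4 (pv_ofList_eq h)
        | exact h5 (pv_ofList_eq h)
        | exact h6 (pv_ofList_eq h)
        | exact h7 (pv_ofList_eq h)
  simp only [if_neg h1, if_neg h2, if_neg h3, if_neg h4, if_neg h5, if_neg h6, if_neg h7]
  simp [pvCanon, hmem]

lemma pvB_core (t : List Char) :
    (let i := PySem.Chars.find t [':'];
     let kv : List Char × Option (List Char) :=
       if i < 0 then (PySem.Chars.lower (PySem.Chars.rstrip t), none)
       else (PySem.Chars.lower (PySem.Chars.rstrip (PySem.Chars.slice t none (some i))),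
             some (PySem.Chars.strip (PySem.Chars.slice t (some (i + 1)) none)));
     if String.ofList kv.1 ∈ pvRowKeywords then (String.ofList kv.1, kv.2.map String.ofList)
     else (String.ofList t, none)) = pvCanon t := by
  have hkv : (if PySem.Chars.find t [':'] < 0
        then (PySem.Chars.lower (PySem.Chars.rstrip t), (none : Option (List Char)))
        else (PySem.Chars.lower (PySem.Chars.rstrip
                (PySem.Chars.slice t none (some (PySem.Chars.find t [':'])))),
              some (PySem.Chars.strip
                (PySem.Chars.slice t (some (PySem.Chars.find t [':'] + 1)) none))))
      = (pvKey t, pvVal t) := by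
    by_cases hi : PySem.Chars.find t [':'] < 0
    · rw [if_pos hi]
      have hneg : PySem.Chars.find t [':'] = -1 := by
        have := PySem.Chars.neg_one_le_find t [':']
        omega
      have hnc : (':' : Char) ∉ t := by
        intro hmem
        exact ((PySem.Chars.find_eq_neg_one_iff t [':']).mp hneg)
          (pv_singleton_infix.mpr hmem)
      have hhead : pvHead t = t :=
        List.takeWhile_eq_self_iff.mpr
          (by intro x hx; simp; rintro rfl; exact hnc hx)
      have htail : pvTail t = [] :=
        List.dropWhile_eq_nil_iff.mpr
          (by intro x hx; simp; rintro rfl; exact hnc hx)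
      rw [pvKey, hhead, pvVal, htail]
    · rw [if_neg hi]
      have hpos : 0 ≤ PySem.Chars.find t [':'] := by omega
      obtain ⟨hpref, hmin⟩ := PySem.Chars.find_spec (s := t) (sub := [':']) hpos
      obtain ⟨b, hb⟩ := pv_singleton_prefix.mp hpref
      obtain ⟨hh, hd⟩ := pv_split_at (t := t) (n := (PySem.Chars.find t [':']).toNat)
        (b := b) hmin hb
      have hs1 : PySem.Chars.slice t none (some (PySem.Chars.find t [':']))
          = t.take (PySem.Chars.find t [':']).toNat := by
        rw [PySem.Chars.slice_eq_listSlice, PySem.List.slice_to _ hpos]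
      have hs2 : PySem.Chars.slice t (some (PySem.Chars.find t [':'] + 1)) none
          = b := by
        rw [PySem.Chars.slice_eq_listSlice, PySem.List.slice_from _ (by omega)]
        have h3 : (PySem.Chars.find t [':'] + 1).toNat
            = (PySem.Chars.find t [':']).toNat + 1 := by omega
        rw [h3, ← List.drop_drop, hb]
        simp
      rw [hs1, hs2, pvKey, pvVal, pvHead, pvTail, hd, hh]
  simp only [hkv, pvCanon]

lemma pvA_eq (text : String) :
    parse_default_value_py text = pvCanon (pvTruncBar text.toList) :=
  pvA_core (pvTruncBar text.toList)

lemma pvB_eq (text : String) :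
    parse_default_value_py_alt text = pvCanon (pvTruncBar text.toList) :=
  pvB_core (pvTruncBar text.toList)

-- ===== VERDICT (by name: the statement is the Claim_ definition above) =====
theorem parse_default_value_py_spec : Claim_equal_parse_default_value_py := by
  intro text _
  unfold Spec_parse_default_value_py
  rw [pvA_eq, pvB_eq]
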